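-- pv_equiv track=rewrite | github.com/yamayuz/algorithms-with-python | algorithms/milestones.py | calc_achieve
-- ===== SOURCE A (Python) =====
-- def calc_achieve(sales:list, milestones: list) -> list:
--     result = []
--
--     for elm_mil in milestones:
--         temp_sum = 0
--         for idx_sal, elm_sal in enumerate(sales):
--             if temp_sum >= elm_mil:
--                 result.append(idx_sal)
--                 break
--             temp_sum += elm_sal
--
--     if sum(sales) < milestones[-1]:
--         result.append(-1)
--
--     return result
-- ===== SOURCE B (Python) =====
-- def calc_achieve(sales: list, milestones: list) -> list:
--     # Running max of prefix sums P[i] = sum(sales[:i]); it is nondecreasing,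
--     # and its first index >= m equals the first index with P[i] >= m.
--     m_arr = []
--     run = 0
--     best = 0
--     for x in sales:
--         best = max(best, run)
--         m_arr.append(best)
--         run += x
--     total = run
--     n = len(m_arr)
--     result = []
--     for m in milestones:
--         lo, hi = 0, n           # bisect_left(m_arr, m): first i with m_arr[i] >= m
--         while lo < hi:
--             mid = (lo + hi) // 2
--             if m_arr[mid] < m:
--                 lo = mid + 1
--             else:
--                 hi = mid
--         if lo < n:
--             result.append(lo)
--     if total < milestones[-1]:
--         result.append(-1)
--     return result
-- ===== Notes on version B (the rewrite author's own statement) =====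
-- stated objective: faster
-- what changed: B computes the running maximum of prefix sums once and answers each milestone with a binary search over that nondecreasing array, instead of A's re-summing scan of sales per milestone.
import Mathlib
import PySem

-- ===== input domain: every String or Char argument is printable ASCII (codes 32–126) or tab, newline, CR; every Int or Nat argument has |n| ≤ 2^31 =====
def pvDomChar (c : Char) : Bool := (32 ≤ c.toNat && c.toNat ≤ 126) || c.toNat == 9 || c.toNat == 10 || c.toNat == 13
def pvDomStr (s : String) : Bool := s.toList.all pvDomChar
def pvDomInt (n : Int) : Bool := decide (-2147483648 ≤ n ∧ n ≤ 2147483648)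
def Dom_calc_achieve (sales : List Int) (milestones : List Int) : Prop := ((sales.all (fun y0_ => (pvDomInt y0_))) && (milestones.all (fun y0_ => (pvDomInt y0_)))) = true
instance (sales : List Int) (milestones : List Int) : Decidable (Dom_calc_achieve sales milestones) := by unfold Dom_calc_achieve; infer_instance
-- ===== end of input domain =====

-- B replaces A's per-milestone rescan of `sales` by one running-max-of-prefix-sums
-- pass plus a binary search per milestone (objective: faster, asymptotic).

-- ===== PORT A =====
-- A's inner `for idx_sal, elm_sal in enumerate(sales): if temp_sum >= elm_mil: append idx; break; temp_sum += elm_sal`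
def innerA (m : Int) (sales : List Int) (idx : Nat) (s : Int) (acc : List Int) : List Int :=
  match sales with
  | [] => acc
  | x :: xs => if m ≤ s then acc ++ [Int.ofNat idx] else innerA m xs (idx + 1) (s + x) acc

def calc_achieve (sales : List Int) (milestones : List Int) : List Int :=
  let result := milestones.foldl (fun acc m => innerA m sales 0 0 acc) []
  -- `milestones[-1]` : pyGet? = none is an IndexError, excluded by Pre_
  match PySem.List.pyGet? milestones (-1) with
  | none => result
  | some lastm => if sales.sum < lastm then result ++ [(-1 : Int)] else result

-- ===== PORT B =====
-- B's first loop: builds m_arr (running max of prefix sums) and total (= run after the loop)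
def buildM (run best : Int) (sales : List Int) : List Int × Int :=
  match sales with
  | [] => ([], run)
  | x :: xs =>
    let b := max best run
    let p := buildM (run + x) b xs
    (b :: p.1, p.2)

-- B's `while lo < hi` bisect_left loop; `a.getD mid 0` is m_arr[mid] (mid is always in range)
def bisectGo (a : List Int) (x : Int) (lo hi : Nat) : Nat :=
  if h : lo < hi then
    let mid := (lo + hi) / 2
    if a.getD mid 0 < x then bisectGo a x (mid + 1) hi else bisectGo a x lo mid
  else lo
  termination_by hi - lo
  decreasing_by all_goals omega

def calc_achieve_alt (sales : List Int) (milestones : List Int) : List Int :=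
  let p := buildM 0 0 sales
  let mArr := p.1
  let total := p.2
  let n := mArr.length
  let result := milestones.foldl (fun acc m =>
    let lo := bisectGo mArr m 0 n
    if lo < n then acc ++ [Int.ofNat lo] else acc) []
  match PySem.List.pyGet? milestones (-1) with
  | none => result
  | some lastm => if total < lastm then result ++ [(-1 : Int)] else result

-- ===== PRECONDITION & SPEC =====
-- A evaluates milestones[-1]: it raises IndexError iff milestones is empty.
def Pre_calc_achieve (sales : List Int) (milestones : List Int) : Prop := milestones ≠ []
instance (sales : List Int) (milestones : List Int) : Decidable (Pre_calc_achieve sales milestones) := by unfold Pre_calc_achieve; infer_instance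
def pvWitness_calc_achieve : List Int × List Int := ([1, 2, 3], [2, 10])

def Spec_calc_achieve (sales : List Int) (milestones : List Int) (out : List Int) : Prop := out = calc_achieve_alt sales milestones
instance (sales : List Int) (milestones : List Int) (out : List Int) : Decidable (Spec_calc_achieve sales milestones out) := by unfold Spec_calc_achieve; infer_instance

-- ===== CLAIM (what is proved, stated in full; the proofs are below) =====
def Claim_equal_calc_achieve : Prop := ∀ (sales : List Int) (milestones : List Int), Dom_calc_achieve sales milestones → Pre_calc_achieve sales milestones → Spec_calc_achieve sales milestones (calc_achieve sales milestones)

-- ===== LEMMAS AND PROOFS =====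

-- P[i] = sum(sales[:i]) as a list: prefList s sales = [s, s+x0, s+x0+x1, …] (length = length sales)
def prefList (s : Int) (sales : List Int) : List Int :=
  match sales with
  | [] => []
  | x :: xs => s :: prefList (s + x) xs

-- running maximum with seed b
def runmaxAux (b : Int) (l : List Int) : List Int :=
  match l with
  | [] => []
  | p :: ps => max b p :: runmaxAux (max b p) ps

-- first index with m ≤ element
def firstGe (m : Int) (l : List Int) : Option Nat :=
  match l with
  | [] => none
  | p :: ps => if m ≤ p then some 0 else (firstGe m ps).map (· + 1)

theorem runmaxAux_length (b : Int) (l : List Int) : (runmaxAux b l).length = l.length := by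
  induction l generalizing b with
  | nil => rfl
  | cons p ps ih => simp [runmaxAux, ih]

theorem buildM_fst (run best : Int) (sales : List Int) :
    (buildM run best sales).1 = runmaxAux best (prefList run sales) := by
  induction sales generalizing run best with
  | nil => rfl
  | cons x xs ih => simp [buildM, prefList, runmaxAux, ih]

theorem buildM_snd (run best : Int) (sales : List Int) :
    (buildM run best sales).2 = run + sales.sum := by
  induction sales generalizing run best with
  | nil => simp [buildM]
  | cons x xs ih => simp [buildM, ih]; ring

theorem innerA_eq_firstGe (m : Int) (sales : List Int) (idx : Nat) (s : Int) (acc : List Int) :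
    innerA m sales idx s acc =
      match firstGe m (prefList s sales) with
      | some j => acc ++ [Int.ofNat (idx + j)]
      | none => acc := by
  induction sales generalizing idx s with
  | nil => rfl
  | cons x xs ih =>
    by_cases h : m ≤ s
    · simp [innerA, prefList, firstGe, h]
    · simp only [innerA, prefList, firstGe, if_neg h, ih (idx + 1) (s + x)]
      cases firstGe m (prefList (s + x) xs) with
      | none => rfl
      | some j =>
        simp only [Option.map_some]
        have : idx + (j + 1) = idx + 1 + j := by omega
        rw [this]

-- all elements of runmaxAux b l are ≥ b
theorem runmaxAux_lb (b : Int) (l : List Int) (i : Nat) (hi : i < (runmaxAux b l).length) :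
    b ≤ (runmaxAux b l).getD i 0 := by
  induction l generalizing b i with
  | nil => simp [runmaxAux] at hi
  | cons p ps ih =>
    cases i with
    | zero => simp [runmaxAux]
    | succ i =>
      simp only [runmaxAux, List.getD_cons_succ]
      simp only [runmaxAux, List.length_cons] at hi
      exact le_trans (le_max_left b p) (ih (max b p) i (by omega))

-- runmaxAux is nondecreasing by index
theorem runmaxAux_mono (b : Int) (l : List Int) (i j : Nat) (hij : i ≤ j)
    (hj : j < (runmaxAux b l).length) :
    (runmaxAux b l).getD i 0 ≤ (runmaxAux b l).getD j 0 := by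
  induction l generalizing b i j with
  | nil => simp [runmaxAux] at hj
  | cons p ps ih =>
    simp only [runmaxAux, List.length_cons, runmaxAux_length] at hj
    cases i with
    | zero =>
      cases j with
      | zero => exact le_refl _
      | succ j =>
        simp only [runmaxAux, List.getD_cons_zero, List.getD_cons_succ]
        exact runmaxAux_lb (max b p) ps j (by rw [runmaxAux_length]; omega)
    | succ i =>
      cases j with
      | zero => omega
      | succ j =>
        simp only [runmaxAux, List.getD_cons_succ]
        exact ih (max b p) i j (by omega) (by rw [runmaxAux_length]; omega)

-- scanning the running max finds the same first index, as long as the seed is below m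
theorem firstGe_runmaxAux (m b : Int) (l : List Int) (hb : b < m) :
    firstGe m (runmaxAux b l) = firstGe m l := by
  induction l generalizing b with
  | nil => rfl
  | cons p ps ih =>
    by_cases h : m ≤ p
    · have : m ≤ max b p := le_trans h (le_max_right b p)
      simp [runmaxAux, firstGe, h, this]
    · have hmax : ¬ m ≤ max b p := by
        simp only [not_le] at *
        exact max_lt hb h
      simp [runmaxAux, firstGe, h, hmax, ih (max b p) (by omega)]

-- characterisation of firstGe
theorem firstGe_spec (m : Int) (l : List Int) :
    (match firstGe m l with
     | none => ∀ i, i < l.length → l.getD i 0 < m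
     | some j => j < l.length ∧ m ≤ l.getD j 0 ∧ ∀ i, i < j → l.getD i 0 < m) := by
  induction l with
  | nil => simp [firstGe]
  | cons p ps ih =>
    by_cases h : m ≤ p
    · simp [firstGe, h]
    · simp only [firstGe, if_neg h]
      cases hfg : firstGe m ps with
      | none =>
        simp only [Option.map_none]
        intro i hi
        cases i with
        | zero => simpa using (by omega : p < m)
        | succ i =>
          rw [hfg] at ih
          simp only [List.getD_cons_succ]
          exact ih i (by simpa using (by simp at hi; omega : i < ps.length))
      | some j =>
        rw [hfg] at ih
        simp only [Option.map_some]
        refine ⟨by simp; omega, by simpa using ih.2.1, ?_⟩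
        intro i hi
        cases i with
        | zero => simpa using (by omega : p < m)
        | succ i => simpa using ih.2.2 i (by omega)

-- bisect postcondition
theorem bisectGo_post (a : List Int) (x : Int)
    (mono : ∀ i j, i ≤ j → j < a.length → a.getD i 0 ≤ a.getD j 0)
    (lo hi : Nat) (hhi : hi ≤ a.length) (hlo : lo ≤ hi)
    (hbelow : ∀ i, i < lo → a.getD i 0 < x)
    (habove : ∀ i, hi ≤ i → i < a.length → x ≤ a.getD i 0) :
    (∀ i, i < bisectGo a x lo hi → a.getD i 0 < x) ∧
    (bisectGo a x lo hi < a.length → x ≤ a.getD (bisectGo a x lo hi) 0) ∧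
    bisectGo a x lo hi ≤ a.length := by
  by_cases h : lo < hi
  · rw [bisectGo, dif_pos h]
    by_cases hc : a.getD ((lo + hi) / 2) 0 < x
    · simp only [if_pos hc]
      exact bisectGo_post a x mono ((lo + hi) / 2 + 1) hi hhi (by omega)
        (fun i hi' => by
          by_cases hil : i < lo
          · exact hbelow i hil
          · exact lt_of_le_of_lt (mono i ((lo + hi) / 2) (by omega) (by omega)) hc)
        habove
    · simp only [if_neg hc]
      exact bisectGo_post a x mono lo ((lo + hi) / 2) (by omega) (by omega) hbelow
        (fun i hmi hil => le_trans (by omega : x ≤ a.getD ((lo + hi) / 2) 0)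
          (mono ((lo + hi) / 2) i hmi hil))
  · rw [bisectGo, dif_neg h]
    have hlohi : lo = hi ∨ lo < hi := by omega
    exact ⟨hbelow, fun hl => habove lo (by omega) hl, by omega⟩
  termination_by hi - lo
  decreasing_by all_goals omega

-- bisect computes firstGe (defaulting to the length)
theorem bisectGo_eq_firstGe (a : List Int) (x : Int)
    (mono : ∀ i j, i ≤ j → j < a.length → a.getD i 0 ≤ a.getD j 0) :
    bisectGo a x 0 a.length = (firstGe x a).getD a.length := by
  obtain ⟨hbel, hab, hle⟩ := bisectGo_post a x mono 0 a.length (le_refl _) (by omega)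
    (by omega) (by omega)
  have hspec := firstGe_spec x a
  cases hfg : firstGe x a with
  | none =>
    rw [hfg] at hspec
    simp only [Option.getD_none]
    by_contra hne
    have hlt : bisectGo a x 0 a.length < a.length := by omega
    exact absurd (hab hlt) (not_le.mpr (hspec _ hlt))
  | some j =>
    rw [hfg] at hspec
    obtain ⟨hjlen, hjge, hjmin⟩ := hspec
    simp only [Option.getD_some]
    by_contra hne
    rcases Nat.lt_or_ge (bisectGo a x 0 a.length) j with hlt | hge
    · exact absurd (hab (by omega)) (not_le.mpr (hjmin _ hlt))
    · exact absurd hjge (not_le.mpr (hbel j (by omega)))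

-- the running-max first index equals the plain prefix-sum first index (from seed 0)
theorem firstGe_top (m : Int) (sales : List Int) :
    firstGe m (runmaxAux 0 (prefList 0 sales)) = firstGe m (prefList 0 sales) := by
  by_cases hm : 0 < m
  · exact firstGe_runmaxAux m 0 _ hm
  · cases sales with
    | nil => rfl
    | cons x xs =>
      have h0 : m ≤ (0 : Int) := by omega
      simp [prefList, runmaxAux, firstGe, h0]

-- per-milestone step equality
theorem step_eq (sales : List Int) (m : Int) (acc : List Int) :
    innerA m sales 0 0 acc =
      (let lo := bisectGo (buildM 0 0 sales).1 m 0 (buildM 0 0 sales).1.length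
       if lo < (buildM 0 0 sales).1.length then acc ++ [Int.ofNat lo] else acc) := by
  rw [innerA_eq_firstGe]
  have hM : (buildM 0 0 sales).1 = runmaxAux 0 (prefList 0 sales) := buildM_fst 0 0 sales
  have hlen : (buildM 0 0 sales).1.length = (prefList 0 sales).length := by
    rw [hM, runmaxAux_length]
  have hbis : bisectGo (buildM 0 0 sales).1 m 0 (buildM 0 0 sales).1.length
      = (firstGe m (prefList 0 sales)).getD (prefList 0 sales).length := by
    rw [hM]
    rw [bisectGo_eq_firstGe _ m (fun i j hij hj => runmaxAux_mono 0 _ i j hij hj)]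
    rw [firstGe_top, runmaxAux_length]
  have hspec := firstGe_spec m (prefList 0 sales)
  cases hfg : firstGe m (prefList 0 sales) with
  | none =>
    rw [hfg] at hbis
    simp only [Option.getD_none] at hbis
    have hnl : ¬ (bisectGo (buildM 0 0 sales).1 m 0 (buildM 0 0 sales).1.length
        < (buildM 0 0 sales).1.length) := by rw [hbis, hlen]; omega
    simp [hnl]
  | some j =>
    rw [hfg] at hbis hspec
    simp only [Option.getD_some] at hbis
    have h2 : j < (buildM 0 0 sales).1.length := by rw [hlen]; exact hspec.1
    simp [hbis, h2]

theorem foldl_ext {α β : Type} (f g : β → α → β) (h : ∀ acc m, f acc m = g acc m)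
    (l : List α) (acc : β) : l.foldl f acc = l.foldl g acc := by
  induction l generalizing acc with
  | nil => rfl
  | cons x xs ih => simp only [List.foldl_cons, h, ih]

-- ===== VERDICT (by name: the statement is the Claim_ definition above) =====
theorem calc_achieve_spec : Claim_equal_calc_achieve := by
  intro sales milestones _ _
  unfold Spec_calc_achieve calc_achieve calc_achieve_alt
  have hres : milestones.foldl (fun acc m => innerA m sales 0 0 acc) []
      = milestones.foldl (fun acc m =>
          let lo := bisectGo (buildM 0 0 sales).1 m 0 (buildM 0 0 sales).1.length
          if lo < (buildM 0 0 sales).1.length then acc ++ [Int.ofNat lo] else acc) [] :=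
    foldl_ext _ _ (fun acc m => step_eq sales m acc) milestones []
  have htot : (buildM 0 0 sales).2 = sales.sum := by rw [buildM_snd]; ring
  simp only [hres, htot]
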